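-- pv_equiv track=rewrite | github.com/jotea3030/python2 | bird_song_quiz.py | filter_valid_recordings
-- ===== SOURCE A (Python) =====
-- def filter_valid_recordings(recordings):
--     """Filter for valid recordings with proper URLs."""
--     valid = []
--
--     # First try to get xeno-canto.org recordings
--     for rec in recordings:
--         file_url = rec.get("file", "")
--         if file_url and file_url.startswith("http") and "xeno-canto.org" in file_url:
--             valid.append(rec)
--
--     # If none found, accept any valid URL
--     if not valid:
--         for rec in recordings:
--             file_url = rec.get("file", "")
--             if file_url and file_url.startswith("http"):
--                 valid.append(rec)
--
--     return valid
-- ===== SOURCE B (Python) =====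
-- def filter_valid_recordings(recordings):
--     """Filter for valid recordings with proper URLs (single pass, two buckets)."""
--     xeno = []
--     any_http = []
--     for rec in recordings:
--         url = rec.get("file", "")
--         if url and url.startswith("http"):
--             any_http.append(rec)
--             if "xeno-canto.org" in url:
--                 xeno.append(rec)
--     return xeno if xeno else any_http
-- ===== Notes on version B (the rewrite author's own statement) =====
-- stated objective: alternative
-- what changed: Replaces A's two sequential scans (xeno pass, then a full rescan for the http fallback) with one pass that fills both the xeno and the any-http bucket simultaneously and picks the non-empty one at the end.
import Mathlib
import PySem

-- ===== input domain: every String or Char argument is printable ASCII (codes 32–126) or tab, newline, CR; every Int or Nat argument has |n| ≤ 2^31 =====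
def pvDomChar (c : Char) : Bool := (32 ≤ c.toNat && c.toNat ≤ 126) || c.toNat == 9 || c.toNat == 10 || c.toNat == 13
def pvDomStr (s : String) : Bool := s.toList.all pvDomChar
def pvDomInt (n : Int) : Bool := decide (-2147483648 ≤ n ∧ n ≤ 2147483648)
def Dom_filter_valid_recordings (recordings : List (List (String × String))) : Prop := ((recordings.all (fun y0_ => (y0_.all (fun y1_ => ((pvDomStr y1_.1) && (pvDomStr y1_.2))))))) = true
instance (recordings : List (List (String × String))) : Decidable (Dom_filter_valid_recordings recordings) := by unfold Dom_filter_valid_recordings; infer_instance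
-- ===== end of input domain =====

-- B replaces A's two sequential scans with one pass filling both buckets; return value only.
-- ===== PORT A =====
def pvUrl (rec : List (String × String)) : String :=
  PySem.Dict.getD (PySem.Dict.mk rec) "file" ""

def filter_valid_recordings (recordings : List (List (String × String))) : List (List (String × String)) :=
  -- first loop: xeno-canto recordings
  let valid := recordings.foldl (fun acc rec =>
    let file_url := pvUrl rec
    if !file_url.toList.isEmpty && PySem.Str.startswith file_url "http"
        && PySem.Str.isIn "xeno-canto.org" file_url then acc ++ [rec] else acc) []
  -- if none found, accept any valid URL
  if valid.isEmpty then
    recordings.foldl (fun acc rec =>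
      let file_url := pvUrl rec
      if !file_url.toList.isEmpty && PySem.Str.startswith file_url "http"
        then acc ++ [rec] else acc) valid
  else valid

-- ===== PORT B =====
def filter_valid_recordings_alt (recordings : List (List (String × String))) : List (List (String × String)) :=
  let st := recordings.foldl (fun (st : List (List (String × String)) × List (List (String × String))) rec =>
      let url := pvUrl rec
      if !url.toList.isEmpty && PySem.Str.startswith url "http" then
        let anyHttp := st.2 ++ [rec]
        if PySem.Str.isIn "xeno-canto.org" url then (st.1 ++ [rec], anyHttp)
        else (st.1, anyHttp)
      else st) ([], [])
  if st.1.isEmpty then st.2 else st.1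

-- ===== PRECONDITION & SPEC =====
def Spec_filter_valid_recordings (recordings : List (List (String × String))) (out : List (List (String × String))) : Prop := out = filter_valid_recordings_alt recordings
instance (recordings : List (List (String × String))) (out : List (List (String × String))) : Decidable (Spec_filter_valid_recordings recordings out) := by unfold Spec_filter_valid_recordings; infer_instance

-- ===== CLAIM (what is proved, stated in full; the proofs are below) =====
def Claim_equal_filter_valid_recordings : Prop := ∀ (recordings : List (List (String × String))), Dom_filter_valid_recordings recordings → Spec_filter_valid_recordings recordings (filter_valid_recordings recordings)

-- ===== LEMMAS AND PROOFS =====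
-- the two tests of the loops, named for the proofs
def pvHttp (rec : List (String × String)) : Bool :=
  !(pvUrl rec).toList.isEmpty && PySem.Str.startswith (pvUrl rec) "http"
def pvXeno (rec : List (String × String)) : Bool :=
  pvHttp rec && PySem.Str.isIn "xeno-canto.org" (pvUrl rec)

-- B's single pass computes both filters at once
lemma alt_fold_eq (l : List (List (String × String)))
    (xa aa : List (List (String × String))) :
    l.foldl (fun (st : List (List (String × String)) × List (List (String × String))) rec =>
      if pvHttp rec then
        if PySem.Str.isIn "xeno-canto.org" (pvUrl rec) then (st.1 ++ [rec], st.2 ++ [rec])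
        else (st.1, st.2 ++ [rec])
      else st) (xa, aa)
    = (xa ++ l.filter pvXeno, aa ++ l.filter pvHttp) := by
  induction l generalizing xa aa with
  | nil => simp
  | cons rec l ih =>
    simp only [List.foldl_cons, List.filter_cons, pvXeno]
    by_cases h2 : pvHttp rec = true
    · by_cases h1 : PySem.Str.isIn "xeno-canto.org" (pvUrl rec) = true
      · simp only [h2, h1, Bool.and_self, if_true, ih,
          List.append_assoc, List.singleton_append]
      · simp only [Bool.not_eq_true] at h1
        simp only [h2, h1, Bool.and_false, if_true, if_false, Bool.false_eq_true, ih,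
          List.append_assoc, List.singleton_append]
    · simp only [Bool.not_eq_true] at h2
      simp only [h2, Bool.false_and, if_false, Bool.false_eq_true, ih]

-- ===== VERDICT (by name: the statement is the Claim_ definition above) =====
theorem filter_valid_recordings_spec : Claim_equal_filter_valid_recordings := by
  intro recordings _
  unfold Spec_filter_valid_recordings
  show (let valid := recordings.foldl
          (fun acc rec => if pvXeno rec then acc ++ [rec] else acc) [];
        if valid.isEmpty then
          recordings.foldl (fun acc rec => if pvHttp rec then acc ++ [rec] else acc) valid
        else valid)
      = (let st := recordings.foldl
          (fun (st : List (List (String × String)) × List (List (String × String))) rec =>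
            if pvHttp rec then
              if PySem.Str.isIn "xeno-canto.org" (pvUrl rec) then (st.1 ++ [rec], st.2 ++ [rec])
              else (st.1, st.2 ++ [rec])
            else st) ([], []);
         if st.1.isEmpty then st.2 else st.1)
  rw [alt_fold_eq]
  simp only [PySem.List.foldl_append_if_eq_filter, List.nil_append]
  by_cases h : (recordings.filter pvXeno).isEmpty
  · rw [List.isEmpty_iff] at h
    simp [h]
  · simp [h]
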